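-- pv_equiv track=rewrite | github.com/mikeczech/challenges | aoc/2023/day5/part_one.py | determine_closest_location
-- ===== SOURCE A (Python) =====
-- def determine_closest_location(seeds, dicts):
--     locations = []
--
--     for s in seeds:
--         target = s
--         for d in dicts: # TODO refactor this
--             match = None
--             for dd in d:
--                 match = dd.get(target)
--                 if match:
--                     break
--             if not match:
--                 match = target
--             target = match
--
--         locations.append(target)
--
--     return min(locations)
-- ===== SOURCE B (Python) =====
-- def determine_closest_location(seeds, dicts):
--     # Pre-merge each stage's list of dicts into ONE dict keeping, per key, the
--     # first truthy value (A only ever uses the first truthy match); then advance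
--     # each seed with a single lookup per stage while tracking a running minimum.
--     stages = []
--     for d in dicts:
--         merged = {}
--         for dd in d:
--             for k, v in dd.items():
--                 if v and k not in merged:
--                     merged[k] = v
--         stages.append(merged)
--     best = None
--     for s in seeds:
--         v = s
--         for stage in stages:
--             v = stage.get(v, v)
--         if best is None or v < best:
--             best = v
--     return best
-- ===== Notes on version B (the rewrite author's own statement) =====
-- stated objective: faster
-- what changed: B precomputes, once per stage, a single merged dict holding each key's first truthy mapping, so A's per-seed inner scan over a stage's list of dicts becomes one dict lookup, and it tracks a running minimum instead of building the locations list and calling min; Pre_ excludes empty seeds, on which A's min([]) raises ValueError.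
import Mathlib
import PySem

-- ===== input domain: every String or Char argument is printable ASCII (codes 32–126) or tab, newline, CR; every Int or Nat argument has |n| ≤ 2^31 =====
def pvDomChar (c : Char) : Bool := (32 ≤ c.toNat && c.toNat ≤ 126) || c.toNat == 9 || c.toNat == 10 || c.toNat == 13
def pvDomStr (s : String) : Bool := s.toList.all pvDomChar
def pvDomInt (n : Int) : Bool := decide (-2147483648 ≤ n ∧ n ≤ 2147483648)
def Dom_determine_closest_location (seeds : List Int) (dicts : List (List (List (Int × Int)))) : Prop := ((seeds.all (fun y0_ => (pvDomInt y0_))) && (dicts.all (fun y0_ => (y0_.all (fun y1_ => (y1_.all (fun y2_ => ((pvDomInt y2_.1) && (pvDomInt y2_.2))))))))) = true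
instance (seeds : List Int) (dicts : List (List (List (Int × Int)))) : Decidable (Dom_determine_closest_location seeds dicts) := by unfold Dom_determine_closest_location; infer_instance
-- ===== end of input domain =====

-- B pre-merges each stage's dicts into one dict (first truthy value per key), so the
-- per-seed inner scan over a stage's dicts becomes a single lookup, and tracks a
-- running minimum instead of building the location list and calling min.
-- ===== PORT A =====
-- Python truthiness of `match` (None and int 0 are falsy)
def pvTruthyA (o : Option Int) : Bool :=
  match o with
  | some v => v != 0
  | none => false

-- inner `for dd in d: match = dd.get(target); if match: break`, carrying `match`
def pvInnerA (t : Int) (m : Option Int) : List (List (Int × Int)) → Option Int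
  | [] => m
  | dd :: rest =>
    let m' := (PySem.Dict.mk dd).get? t
    if pvTruthyA m' then m' else pvInnerA t m' rest

-- one stage: `if not match: match = target; target = match`
def pvStageA (t : Int) (d : List (List (Int × Int))) : Int :=
  let m := pvInnerA t none d
  match m with
  | some v => if v == 0 then t else v
  | none => t

def determine_closest_location (seeds : List Int) (dicts : List (List (List (Int × Int)))) : Int :=
  let locations := seeds.foldl (fun locs s =>
    let target := dicts.foldl (fun t d => pvStageA t d) s
    locs ++ [target]) []
  -- min(locations): raises ValueError on [] (excluded by Pre_); total form via getD
  (PySem.List.min? locations (fun x => x)).getD 0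

-- ===== PORT B =====
-- `for dd in d: for k, v in dd.items(): if v and k not in merged: merged[k] = v`
def pvMergeStage (d : List (List (Int × Int))) : PySem.Dict Int Int :=
  d.foldl (fun merged dd =>
    (PySem.Dict.mk dd).items.foldl
      (fun merged kv =>
        if kv.2 != 0 && !(merged.contains kv.1) then merged.insert kv.1 kv.2 else merged)
      merged) PySem.Dict.empty

-- `for stage in stages: v = stage.get(v, v)`
def pvResolveB (stages : List (PySem.Dict Int Int)) (s : Int) : Int :=
  stages.foldl (fun v stage => stage.getD v v) s

def determine_closest_location_alt (seeds : List Int) (dicts : List (List (List (Int × Int)))) : Int :=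
  let stages := dicts.map pvMergeStage
  let best := seeds.foldl (fun best s =>
    let v := pvResolveB stages s
    match best with
    | none => some v
    | some b => if v < b then some v else some b) none
  -- Python B returns `best` (None on empty seeds, excluded by Pre_); total form via getD
  best.getD 0

-- ===== PRECONDITION & SPEC =====
-- Pre_ excludes (a) empty seeds, on which A's min([]) raises ValueError, and (b) assoc
-- lists with duplicate keys inside a stage dict, which do not represent any Python dict
-- (the Python inputs are real dicts, whose keys are always distinct).
def Pre_determine_closest_location (seeds : List Int) (dicts : List (List (List (Int × Int)))) : Prop :=
  seeds ≠ [] ∧ ∀ d ∈ dicts, ∀ dd ∈ d, (dd.map Prod.fst).Nodup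
instance (seeds : List Int) (dicts : List (List (List (Int × Int)))) : Decidable (Pre_determine_closest_location seeds dicts) := by unfold Pre_determine_closest_location; infer_instance

def pvWitness_determine_closest_location : List Int × (List (List (List (Int × Int)))) :=
  ([79, 14, 55, 13], [[[(79, 81)], [(14, 53)]], [[(81, 4), (53, 49)]]])

def Spec_determine_closest_location (seeds : List Int) (dicts : List (List (List (Int × Int)))) (out : Int) : Prop := out = determine_closest_location_alt seeds dicts
instance (seeds : List Int) (dicts : List (List (List (Int × Int)))) (out : Int) : Decidable (Spec_determine_closest_location seeds dicts out) := by unfold Spec_determine_closest_location; infer_instance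

-- ===== CLAIM (what is proved, stated in full; the proofs are below) =====
def Claim_equal_determine_closest_location : Prop := ∀ (seeds : List Int) (dicts : List (List (List (Int × Int)))), Dom_determine_closest_location seeds dicts → Pre_determine_closest_location seeds dicts → Spec_determine_closest_location seeds dicts (determine_closest_location seeds dicts)

-- ===== LEMMAS AND PROOFS =====

-- the value A's stage effectively uses: the first nonzero lookup of t across d's dicts
def pvFirst (t : Int) : List (List (Int × Int)) → Option Int
  | [] => none
  | dd :: rest =>
    match (PySem.Dict.mk dd).get? t with
    | some v => if v = 0 then pvFirst t rest else some v
    | none => pvFirst t rest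

-- A's stage computes `pvFirst`, patched with the identity
theorem stageA_eq_first (t : Int) (d : List (List (Int × Int))) :
    pvStageA t d = (match pvFirst t d with | some v => v | none => t) := by
  have key : ∀ (d : List (List (Int × Int))) (m : Option Int), pvTruthyA m = false →
      (match pvInnerA t m d with
       | some v => if v == 0 then t else v
       | none => t) = (match pvFirst t d with | some v => v | none => t) := by
    intro d
    induction d with
    | nil =>
      intro m hm
      simp only [pvInnerA, pvFirst]
      match m, hm with
      | none, _ => rfl
      | some v, hv =>
        simp only [pvTruthyA, bne, Bool.not_eq_false', beq_iff_eq] at hv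
        simp [hv]
    | cons dd rest ih =>
      intro m hm
      simp only [pvInnerA, pvFirst]
      cases h : (PySem.Dict.mk dd).get? t with
      | none =>
        have hfalse : pvTruthyA (none : Option Int) = false := rfl
        simp only [h, hfalse, Bool.false_eq_true, if_false]
        exact ih none hfalse
      | some v =>
        by_cases hv : v = 0
        · subst hv
          have hfalse : pvTruthyA (some (0 : Int)) = false := by decide
          simp only [h, hfalse, Bool.false_eq_true, if_false]
          exact ih (some 0) hfalse
        · have htrue : pvTruthyA (some v) = true := by simp [pvTruthyA, hv]
          simp only [htrue, if_true]
          simp [hv]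
  exact key d none rfl

-- one dict of a stage merged into `st`: lookup falls back from st to the nonzero entry of dd
theorem merge_dd_get? (dd : List (Int × Int)) (st : PySem.Dict Int Int) (t : Int)
    (hnd : (dd.map Prod.fst).Nodup) :
    ((PySem.Dict.mk dd).items.foldl
      (fun merged kv =>
        if kv.2 != 0 && !(merged.contains kv.1) then merged.insert kv.1 kv.2 else merged)
      st).get? t =
    (match st.get? t with
     | some w => some w
     | none =>
       match (PySem.Dict.mk dd).get? t with
       | some v => if v = 0 then none else some v
       | none => none) := by
  induction dd generalizing st with
  | nil =>
    have hmk : (PySem.Dict.mk ([] : List (Int × Int))).items = [] := rfl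
    rw [hmk, List.foldl_nil]
    have hget : (PySem.Dict.mk ([] : List (Int × Int))).get? t = none := rfl
    cases h : st.get? t <;> simp [h, hget]
  | cons kv rest ih =>
    obtain ⟨k, v⟩ := kv
    simp only [List.map_cons, List.nodup_cons] at hnd
    obtain ⟨hk, hnd'⟩ := hnd
    have hitems : (PySem.Dict.mk ((k, v) :: rest)).items = (k, v) :: (PySem.Dict.mk rest).items := rfl
    rw [hitems, List.foldl_cons]
    by_cases hv : v = 0
    · subst hv
      simp only [bne_self_eq_false, Bool.false_and, Bool.false_eq_true, if_false]
      rw [ih st hnd']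
      cases hst : st.get? t
      · simp only [hst]
        rw [PySem.Dict.get?_mk_cons]
        by_cases htk : k = t
        · subst htk
          simp only [beq_self_eq_true, if_pos rfl, if_true]
          -- t ∉ rest's keys, so rest's lookup is none
          have : (PySem.Dict.mk rest).get? k = none := by
            rw [PySem.Dict.get?_eq_none_iff_not_mem_keys]
            simpa [PySem.Dict.keys, PySem.Dict.mk, PySem.Dict.items] using hk
          simp [this]
        · simp [beq_iff_eq, htk]
      · simp [hst]
    · by_cases hc : st.contains k
      · simp only [hc, Bool.not_true, Bool.and_false, Bool.false_eq_true, if_false]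
        rw [ih st hnd']
        cases hst : st.get? t
        · simp only [hst]
          rw [PySem.Dict.get?_mk_cons]
          by_cases htk : k = t
          · subst htk
            -- st contains k but get? k = none: impossible
            exfalso
            rw [PySem.Dict.contains_eq_isSome_get?, hst] at hc
            simp at hc
          · simp [beq_iff_eq, htk]
        · simp [hst]
      · have hcond : (v != 0 && !(st.contains k)) = true := by
          simp [bne, hv, hc]
        simp only [hcond, if_true]
        rw [ih (st.insert k v) hnd']
        rw [PySem.Dict.get?_insert]
        by_cases htk : t = k
        · subst htk
          cases hst : st.get? t
          · simp only [if_pos rfl, hst]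
            rw [PySem.Dict.get?_mk_cons]
            simp [hv]
          · -- contains false but get? some: impossible
            exfalso
            rw [PySem.Dict.contains_eq_isSome_get?, hst] at hc
            simp at hc
        · simp only [if_neg htk]
          cases hst : st.get? t
          · simp only [hst]
            rw [PySem.Dict.get?_mk_cons]
            have : (k == t) = false := by simp [beq_iff_eq]; omega
            simp [this]
          · simp [hst]

-- the whole stage merged: lookup is exactly pvFirst
theorem mergeStage_get? (d : List (List (Int × Int))) (t : Int)
    (hnd : ∀ dd ∈ d, (dd.map Prod.fst).Nodup) :
    (pvMergeStage d).get? t = pvFirst t d := by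
  unfold pvMergeStage
  suffices h : ∀ (st : PySem.Dict Int Int),
      (d.foldl (fun merged dd =>
        (PySem.Dict.mk dd).items.foldl
          (fun merged kv =>
            if kv.2 != 0 && !(merged.contains kv.1) then merged.insert kv.1 kv.2 else merged)
          merged) st).get? t =
      (match st.get? t with | some w => some w | none => pvFirst t d) by
    rw [h PySem.Dict.empty]
    simp [PySem.Dict.get?_empty]
  induction d with
  | nil => intro st; cases h : st.get? t <;> simp [pvFirst, h]
  | cons dd rest ih =>
    intro st
    rw [List.foldl_cons, ih (fun x hx => hnd x (by simp [hx]))]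
    rw [merge_dd_get? dd st t (hnd dd (by simp))]
    simp only [pvFirst]
    cases hst : st.get? t
    · cases h : (PySem.Dict.mk dd).get? t
      · simp
      · by_cases hv : ‹Int› = 0 <;> rename_i v <;> by_cases hv : v = 0 <;> simp [hv]
    · simp

-- B's per-stage lookup equals A's stage function
theorem stage_lookup_eq (t : Int) (d : List (List (Int × Int)))
    (hnd : ∀ dd ∈ d, (dd.map Prod.fst).Nodup) :
    (pvMergeStage d).getD t t = pvStageA t d := by
  rw [PySem.Dict.getD_eq_get?_getD, mergeStage_get? d t hnd, stageA_eq_first]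
  cases pvFirst t d <;> rfl

-- B resolves a seed exactly as A's stage fold does
theorem resolve_eq (dicts : List (List (List (Int × Int)))) (s : Int)
    (hnd : ∀ d ∈ dicts, ∀ dd ∈ d, (dd.map Prod.fst).Nodup) :
    pvResolveB (dicts.map pvMergeStage) s = dicts.foldl (fun t d => pvStageA t d) s := by
  unfold pvResolveB
  rw [List.foldl_map]
  induction dicts generalizing s with
  | nil => rfl
  | cons d rest ih =>
    simp only [List.foldl_cons]
    rw [stage_lookup_eq s d (hnd d (by simp))]
    exact ih _ (fun x hx => hnd x (by simp [hx]))

-- A's append-accumulator loop builds acc ++ map f seeds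
theorem foldl_append_map (f : Int → Int) (seeds acc : List Int) :
    seeds.foldl (fun locs s => locs ++ [f s]) acc = acc ++ seeds.map f := by
  induction seeds generalizing acc with
  | nil => simp
  | cons s rest ih => simp [List.foldl_cons, ih]

-- B's running-minimum loop equals min over the mapped list
theorem running_min_eq (f : Int → Int) (b : Int) (rest : List Int) :
    rest.foldl (fun best s =>
      let v := f s
      match best with
      | none => some v
      | some b => if v < b then some v else some b) (some b) =
    some ((rest.map f).foldl min b) := by
  induction rest generalizing b with
  | nil => rfl
  | cons s t ih =>
    simp only [List.foldl_cons, List.map_cons]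
    have hstep : (if f s < b then some (f s) else some b) = some (min b (f s)) := by
      by_cases h : f s < b
      · simp [h, min_eq_right (le_of_lt h)]
      · simp [h, min_eq_left (le_of_not_gt h)]
    rw [hstep, ih]

-- ===== VERDICT (by name: the statement is the Claim_ definition above) =====
theorem determine_closest_location_spec : Claim_equal_determine_closest_location := by
  intro seeds dicts _ hpre
  obtain ⟨hne, hnd⟩ := hpre
  unfold Spec_determine_closest_location determine_closest_location determine_closest_location_alt
  obtain ⟨s0, rest, rfl⟩ : ∃ s0 rest, seeds = s0 :: rest := by
    cases seeds with
    | nil => exact absurd rfl hne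
    | cons a l => exact ⟨a, l, rfl⟩
  have hres : ∀ s, pvResolveB (dicts.map pvMergeStage) s
      = dicts.foldl (fun t d => pvStageA t d) s := fun s => resolve_eq dicts s hnd
  simp only [foldl_append_map, List.nil_append, List.foldl_cons, List.map_cons,
    hres]
  rw [running_min_eq, List.singleton_append, PySem.List.min?_id_cons]
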